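-- pv_equiv track=rewrite | github.com/keepinmind2054/evoclaw | host/memory/dream_task.py | _parse_warm_entry_block
-- ===== SOURCE A (Python) =====
-- from typing import Optional
--
-- def _parse_warm_entry_block(block: str) -> Optional[dict]:
--     """Parse a single warm log block of the form:
--         ### HH:MM
--         User: ...
--         Bot: ...
--
--     Returns a dict with keys: time, user, bot, or None if unparseable.
--     """
--     block = block.strip()
--     if not block:
--         return None
--
--     lines = block.splitlines()
--     time_str = ""
--     user_text = ""
--     bot_text = ""
--
--     for line in lines:
--         line_stripped = line.strip()
--         if line_stripped.startswith("### "):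
--             time_str = line_stripped[4:].strip()
--         elif line_stripped.startswith("User:"):
--             user_text = line_stripped[5:].strip()
--         elif line_stripped.startswith("Bot:"):
--             bot_text = line_stripped[4:].strip()
--
--     if not time_str and not user_text and not bot_text:
--         return None
--
--     return {"time": time_str, "user": user_text, "bot": bot_text}
-- ===== SOURCE B (Python) =====
-- def _parse_warm_entry_block(block):
--     """Parse a warm log block by three independent last-match prefix scans."""
--     block = block.strip()
--     if not block:
--         return None
--
--     stripped = [line.strip() for line in block.splitlines()]
--
--     def last(prefix, n):
--         for s in reversed(stripped):
--             if s.startswith(prefix):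
--                 return s[n:].strip()
--         return ""
--
--     time_str = last("### ", 4)
--     user_text = last("User:", 5)
--     bot_text = last("Bot:", 4)
--
--     if not time_str and not user_text and not bot_text:
--         return None
--
--     return {"time": time_str, "user": user_text, "bot": bot_text}
-- ===== Notes on version B (the rewrite author's own statement) =====
-- stated objective: alternative
-- what changed: Replaced the single stateful dispatch loop over the lines with three independent backward scans (one per field), each returning the last stripped line with the given prefix; valid because the three prefixes are mutually exclusive on any line.
import Mathlib
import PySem

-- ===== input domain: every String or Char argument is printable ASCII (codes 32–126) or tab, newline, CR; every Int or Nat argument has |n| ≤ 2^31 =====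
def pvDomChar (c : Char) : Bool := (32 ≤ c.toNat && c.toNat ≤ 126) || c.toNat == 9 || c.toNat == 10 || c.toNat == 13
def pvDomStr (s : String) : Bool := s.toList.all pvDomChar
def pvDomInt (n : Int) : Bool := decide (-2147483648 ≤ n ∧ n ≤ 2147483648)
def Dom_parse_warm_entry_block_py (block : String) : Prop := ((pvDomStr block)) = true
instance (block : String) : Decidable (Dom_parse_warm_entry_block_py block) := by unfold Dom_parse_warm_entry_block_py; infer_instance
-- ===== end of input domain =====

-- B replaces A's single stateful dispatch loop by three independent backward last-match
-- prefix scans (alternative decomposition, same cost); return values proved equal.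

-- ===== PORT A =====
def parse_warm_entry_block_py (block : String) : Option (List (String × String)) :=
  let block := PySem.Str.strip block
  if block = "" then none
  else
    let lines := PySem.Str.splitlines block
    let st := lines.foldl (fun (s : String × String × String) line =>
      let ls := PySem.Str.strip line
      if PySem.Str.startswith ls "### " then
        (PySem.Str.strip (PySem.Str.slice ls (some 4) none), s.2.1, s.2.2)
      else if PySem.Str.startswith ls "User:" then
        (s.1, PySem.Str.strip (PySem.Str.slice ls (some 5) none), s.2.2)
      else if PySem.Str.startswith ls "Bot:" then
        (s.1, s.2.1, PySem.Str.strip (PySem.Str.slice ls (some 4) none))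
      else s) ("", "", "")
    if st.1 = "" ∧ st.2.1 = "" ∧ st.2.2 = "" then none
    else some [("time", st.1), ("user", st.2.1), ("bot", st.2.2)]

-- ===== PORT B =====
-- B's helper `last`: first match in the reversed stripped lines, '' if none
def pvLastMatch (stripped : List String) (pre : String) (n : Int) : String :=
  match stripped.reverse.find? (fun s => PySem.Str.startswith s pre) with
  | some s => PySem.Str.strip (PySem.Str.slice s (some n) none)
  | none => ""

def parse_warm_entry_block_py_alt (block : String) : Option (List (String × String)) :=
  let block := PySem.Str.strip block
  if block = "" then none
  else
    let stripped := (PySem.Str.splitlines block).map PySem.Str.strip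
    let time_str := pvLastMatch stripped "### " 4
    let user_text := pvLastMatch stripped "User:" 5
    let bot_text := pvLastMatch stripped "Bot:" 4
    if time_str = "" ∧ user_text = "" ∧ bot_text = "" then none
    else some [("time", time_str), ("user", user_text), ("bot", bot_text)]

-- ===== PRECONDITION & SPEC =====
def Spec_parse_warm_entry_block_py (block : String) (out : Option (List (String × String))) : Prop := out = parse_warm_entry_block_py_alt block
instance (block : String) (out : Option (List (String × String))) : Decidable (Spec_parse_warm_entry_block_py block out) := by unfold Spec_parse_warm_entry_block_py; infer_instance

-- ===== CLAIM (what is proved, stated in full; the proofs are below) =====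
def Claim_equal_parse_warm_entry_block_py : Prop := ∀ (block : String), Dom_parse_warm_entry_block_py block → Spec_parse_warm_entry_block_py block (parse_warm_entry_block_py block)

-- ===== LEMMAS AND PROOFS =====

-- `pvLastMatch` with an arbitrary default instead of ""
def pvLastOr (stripped : List String) (pre : String) (n : Int) (d : String) : String :=
  match stripped.reverse.find? (fun s => PySem.Str.startswith s pre) with
  | some s => PySem.Str.strip (PySem.Str.slice s (some n) none)
  | none => d

theorem pvLastOr_cons (x : String) (l : List String) (pre : String) (n : Int) (d : String) :
    pvLastOr (x :: l) pre n d
      = pvLastOr l pre n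
          (if PySem.Str.startswith x pre then PySem.Str.strip (PySem.Str.slice x (some n) none) else d) := by
  unfold pvLastOr
  rw [List.reverse_cons, List.find?_append]
  cases h : l.reverse.find? (fun s => PySem.Str.startswith s pre) with
  | some s => simp only [Option.some_or]
  | none =>
    by_cases hx : PySem.Str.startswith x pre = true
    · rw [PySem.Str.startswith_eq] at hx
      simp [List.find?, hx]
    · rw [Bool.not_eq_true, PySem.Str.startswith_eq] at hx
      simp [List.find?, hx]

-- two nonempty prefixes with distinct first characters cannot both be prefixes of one string
theorem pv_excl (cs : List Char) (a : Char) (p : List Char) (b : Char) (q : List Char)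
    (hne : a ≠ b) (h : PySem.Chars.startswith cs (a :: p) = true) :
    PySem.Chars.startswith cs (b :: q) = false := by
  by_contra hc
  rw [Bool.not_eq_false, PySem.Chars.startswith_iff] at hc
  rw [PySem.Chars.startswith_iff] at h
  obtain ⟨ta, hta⟩ := h
  obtain ⟨tb, htb⟩ := hc
  apply hne
  have h2 : a :: (p ++ ta) = b :: (q ++ tb) := by
    simpa using hta.trans htb.symm
  exact ((List.cons.injEq _ _ _ _).mp h2).1

-- the loop invariant: A's dispatch fold computes the three last prefix matches
theorem pv_fold_eq (lines : List String) (s : String × String × String) :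
    lines.foldl (fun (s : String × String × String) line =>
      if PySem.Str.startswith (PySem.Str.strip line) "### " then
        (PySem.Str.strip (PySem.Str.slice (PySem.Str.strip line) (some 4) none), s.2.1, s.2.2)
      else if PySem.Str.startswith (PySem.Str.strip line) "User:" then
        (s.1, PySem.Str.strip (PySem.Str.slice (PySem.Str.strip line) (some 5) none), s.2.2)
      else if PySem.Str.startswith (PySem.Str.strip line) "Bot:" then
        (s.1, s.2.1, PySem.Str.strip (PySem.Str.slice (PySem.Str.strip line) (some 4) none))
      else s) s
    = (pvLastOr (lines.map PySem.Str.strip) "### " 4 s.1,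
       pvLastOr (lines.map PySem.Str.strip) "User:" 5 s.2.1,
       pvLastOr (lines.map PySem.Str.strip) "Bot:" 4 s.2.2) := by
  induction lines generalizing s with
  | nil => simp [pvLastOr]
  | cons x l ih =>
    simp only [List.foldl_cons, List.map_cons, ih, pvLastOr_cons]
    by_cases h1 : PySem.Str.startswith (PySem.Str.strip x) "### " = true
    · have h2 : PySem.Str.startswith (PySem.Str.strip x) "User:" = false := by
        rw [PySem.Str.startswith_eq] at h1 ⊢
        exact pv_excl _ '#' _ 'U' _ (by decide) h1
      have h3 : PySem.Str.startswith (PySem.Str.strip x) "Bot:" = false := by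
        rw [PySem.Str.startswith_eq] at h1 ⊢
        exact pv_excl _ '#' _ 'B' _ (by decide) h1
      simp only [h1, h2, h3, if_true, Bool.false_eq_true, if_false]
    · rw [Bool.not_eq_true] at h1
      by_cases h2 : PySem.Str.startswith (PySem.Str.strip x) "User:" = true
      · have h3 : PySem.Str.startswith (PySem.Str.strip x) "Bot:" = false := by
          rw [PySem.Str.startswith_eq] at h2 ⊢
          exact pv_excl _ 'U' _ 'B' _ (by decide) h2
        simp only [h1, h2, h3, if_true, Bool.false_eq_true, if_false]
      · rw [Bool.not_eq_true] at h2
        by_cases h3 : PySem.Str.startswith (PySem.Str.strip x) "Bot:" = true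
        · simp only [h1, h2, h3, if_true, Bool.false_eq_true, if_false]
        · rw [Bool.not_eq_true] at h3
          simp only [h1, h2, h3, Bool.false_eq_true, if_false]

-- ===== VERDICT (by name: the statement is the Claim_ definition above) =====
theorem parse_warm_entry_block_py_spec : Claim_equal_parse_warm_entry_block_py := by
  intro block _
  unfold Spec_parse_warm_entry_block_py parse_warm_entry_block_py parse_warm_entry_block_py_alt
  have key := pv_fold_eq (PySem.Str.splitlines (PySem.Str.strip block)) ("", "", "")
  have e : ∀ sl p n, pvLastOr sl p n "" = pvLastMatch sl p n := fun _ _ _ => rfl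
  simp only [key, e]
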